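-- pv_equiv track=rewrite | github.com/Gilgames000/nos-damage | util/sptools.py | ele_base_build
-- ===== SOURCE A (Python) =====
-- def ele_base_build(element=0, build=None):
--     if build:
--         element = build[2]
--
--     if element == 0:
--         return 0
--     if 1 <= element <= 50:
--         return 1 + ele_base_build(element - 1)
--     if 51 <= element <= 100:
--         return 2 + ele_base_build(element - 1)
--     raise ValueError("SP build element points must be an integer "
--                      "between 0 and 100")
-- ===== SOURCE B (Python) =====
-- def ele_base_build(element=0, build=None):
--     if build:
--         element = build[2]
--     if 0 <= element <= 100:
--         return element + max(element - 50, 0)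
--     raise ValueError("SP build element points must be an integer "
--                      "between 0 and 100")
-- ===== Notes on version B (the rewrite author's own statement) =====
-- stated objective: simpler
-- what changed: Replaces the decrement-by-1 recursion (1 point per level up to 50, 2 per level above) by the closed form element + max(element - 50, 0) behind a single range check.
import Mathlib
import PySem

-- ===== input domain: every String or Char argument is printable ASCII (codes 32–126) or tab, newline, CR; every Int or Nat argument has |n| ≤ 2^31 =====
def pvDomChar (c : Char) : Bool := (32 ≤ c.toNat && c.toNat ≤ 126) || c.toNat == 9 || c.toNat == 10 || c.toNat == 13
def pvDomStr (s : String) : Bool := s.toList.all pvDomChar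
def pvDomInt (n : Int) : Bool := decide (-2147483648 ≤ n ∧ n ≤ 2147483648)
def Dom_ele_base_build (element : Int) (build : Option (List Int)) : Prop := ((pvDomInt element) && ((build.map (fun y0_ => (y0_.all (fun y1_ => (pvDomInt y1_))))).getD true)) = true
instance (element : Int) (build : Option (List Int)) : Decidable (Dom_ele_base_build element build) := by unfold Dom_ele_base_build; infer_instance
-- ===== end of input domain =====

-- B replaces A's decrement-by-1 recursion by the closed form element + max(element-50, 0) behind one range check.
-- ===== PORT A =====
-- the recursive body of A after the `if build:` prefix; the unreachable `raise ValueError` branch is the final 0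
def ele_base_build_rec (element : Int) : Int :=
  if element = 0 then 0
  else if 1 ≤ element ∧ element ≤ 50 then 1 + ele_base_build_rec (element - 1)
  else if 51 ≤ element ∧ element ≤ 100 then 2 + ele_base_build_rec (element - 1)
  else 0
termination_by element.toNat
decreasing_by all_goals omega

def ele_base_build (element : Int) (build : Option (List Int)) : Int :=
  let element := match build with
    | some l => if l ≠ [] then (PySem.List.pyGet? l 2).getD 0 else element  -- build[2]; IndexError (none) excluded by Pre_
    | none => element
  ele_base_build_rec element

-- ===== PORT B =====
def ele_base_build_alt (element : Int) (build : Option (List Int)) : Int :=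
  let element := match build with
    | some l => if l ≠ [] then (PySem.List.pyGet? l 2).getD 0 else element
    | none => element
  if 0 ≤ element ∧ element ≤ 100 then element + max (element - 50) 0 else 0  -- raise ValueError, excluded by Pre_

-- ===== PRECONDITION & SPEC =====
-- Pre_ holds exactly where A returns: the effective element (build[2] if build is a non-empty list,
-- else the element argument) exists and lies in [0, 100]; elsewhere A raises IndexError or ValueError.
-- the effective element: build[2] when build is a truthy (non-empty) list, else the element argument;
-- none where Python's build[2] raises IndexError
def pvEff_ele_base_build (element : Int) (build : Option (List Int)) : Option Int :=
  match build with
  | some l => if l ≠ [] then PySem.List.pyGet? l 2 else some element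
  | none => some element

def Pre_ele_base_build (element : Int) (build : Option (List Int)) : Prop :=
  0 ≤ (pvEff_ele_base_build element build).getD (-1) ∧ (pvEff_ele_base_build element build).getD (-1) ≤ 100
instance (element : Int) (build : Option (List Int)) : Decidable (Pre_ele_base_build element build) := by unfold Pre_ele_base_build; infer_instance

def pvWitness_ele_base_build : Int × Option (List Int) := (7, some [1, 2, 60])

def Spec_ele_base_build (element : Int) (build : Option (List Int)) (out : Int) : Prop := out = ele_base_build_alt element build
instance (element : Int) (build : Option (List Int)) (out : Int) : Decidable (Spec_ele_base_build element build out) := by unfold Spec_ele_base_build; infer_instance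

-- ===== CLAIM (what is proved, stated in full; the proofs are below) =====
def Claim_equal_ele_base_build : Prop := ∀ (element : Int) (build : Option (List Int)), Dom_ele_base_build element build → Pre_ele_base_build element build → Spec_ele_base_build element build (ele_base_build element build)

-- ===== LEMMAS AND PROOFS =====
theorem ele_base_build_rec_closed (e : Int) (h0 : 0 ≤ e) (h1 : e ≤ 100) :
    ele_base_build_rec e = e + max (e - 50) 0 := by
  obtain ⟨n, rfl⟩ : ∃ n : Nat, e = (n : Int) := ⟨e.toNat, by omega⟩
  have hn : n ≤ 100 := by exact_mod_cast h1
  clear h0 h1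
  induction n with
  | zero => simp [ele_base_build_rec]
  | succ m ih =>
      have ihm := ih (by omega)
      rw [ele_base_build_rec]
      have he : ((m + 1 : Nat) : Int) - 1 = (m : Int) := by push_cast; ring
      rw [he, ihm]
      split_ifs <;> push_cast at * <;> omega


-- ===== VERDICT (by name: the statement is the Claim_ definition above) =====
theorem ele_base_build_spec : Claim_equal_ele_base_build := by
  intro element build _ hpre
  unfold Spec_ele_base_build ele_base_build ele_base_build_alt
  unfold Pre_ele_base_build pvEff_ele_base_build at hpre
  cases build with
  | none =>
      simp only [Option.getD_some] at hpre
      simp only []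
      rw [if_pos hpre, ele_base_build_rec_closed element hpre.1 hpre.2]
  | some l =>
      by_cases hl : l ≠ []
      · simp only [if_pos hl] at hpre ⊢
        cases hg : PySem.List.pyGet? l 2 with
        | none => rw [hg] at hpre; simp at hpre
        | some v =>
            simp only [hg, Option.getD_some] at hpre ⊢
            rw [if_pos hpre, ele_base_build_rec_closed v hpre.1 hpre.2]
      · simp only [if_neg hl, Option.getD_some] at hpre ⊢
        rw [if_pos hpre, ele_base_build_rec_closed element hpre.1 hpre.2]
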